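-- pv_equiv track=rewrite | github.com/adutoi/QodeApplications | Be-states/configurations.py | all_configs
-- ===== SOURCE A (Python) =====
-- def _all_configs(active_orbs, num_active_elec, static_config):
--     configs = []
--     for p in range(num_active_elec-1, len(active_orbs)):
--         config = static_config + 2**active_orbs[p]
--         if num_active_elec==1:  configs += [config]
--         else:                   configs += _all_configs(active_orbs[:p], num_active_elec-1, config)
--     return configs
--
-- def all_configs(num_tot_orb, num_active_elec, frozen_occ_orbs=None, frozen_vrt_orbs=None):
--     if frozen_occ_orbs is None:  frozen_occ_orbs = []
--     if frozen_vrt_orbs is None:  frozen_vrt_orbs = []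
--     frozen_occ_orbs = set(frozen_occ_orbs)
--     frozen_vrt_orbs = set(frozen_vrt_orbs)
--     static_config = 0
--     active_orbs = []
--     for p in range(num_tot_orb):
--         if p in frozen_occ_orbs:
--             static_config += 2**p
--         elif p not in frozen_vrt_orbs:
--             active_orbs += [p]
--     return _all_configs(active_orbs, num_active_elec, static_config)
-- ===== SOURCE B (Python) =====
-- def all_configs(num_tot_orb, num_active_elec, frozen_occ_orbs=None, frozen_vrt_orbs=None):
--     occ = set(frozen_occ_orbs) if frozen_occ_orbs is not None else set()
--     vrt = set(frozen_vrt_orbs) if frozen_vrt_orbs is not None else set()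
--     static_config = sum(2**p for p in range(num_tot_orb) if p in occ)
--     active_orbs = [p for p in range(num_tot_orb) if p not in occ and p not in vrt]
--     k = num_active_elec
--     n = len(active_orbs)
--     if k > n:
--         return []
--     # rows[j] = all j-electron masks over the orbitals seen so far; a row that can no
--     # longer be extended to k electrons by the remaining orbitals is dropped.
--     rows = [[static_config]] + [[] for _ in range(k)]
--     for idx, o in enumerate(active_orbs):
--         w = 2 ** o
--         rows = [[] if j + (n - idx - 1) < k else
--                 (rows[0] if j == 0 else rows[j] + [m + w for m in rows[j - 1]])
--                 for j in range(k + 1)]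
--     return rows[k]
-- ===== Notes on version B (the rewrite author's own statement) =====
-- stated objective: alternative
-- what changed: Replaces A's recursive colex enumeration over list prefixes (with repeated slicing) by a single dynamic-programming pass over the active orbitals that maintains, for each electron count j, the list of j-electron masks built so far, dropping rows that can no longer reach k electrons with the remaining orbitals.
import Mathlib
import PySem

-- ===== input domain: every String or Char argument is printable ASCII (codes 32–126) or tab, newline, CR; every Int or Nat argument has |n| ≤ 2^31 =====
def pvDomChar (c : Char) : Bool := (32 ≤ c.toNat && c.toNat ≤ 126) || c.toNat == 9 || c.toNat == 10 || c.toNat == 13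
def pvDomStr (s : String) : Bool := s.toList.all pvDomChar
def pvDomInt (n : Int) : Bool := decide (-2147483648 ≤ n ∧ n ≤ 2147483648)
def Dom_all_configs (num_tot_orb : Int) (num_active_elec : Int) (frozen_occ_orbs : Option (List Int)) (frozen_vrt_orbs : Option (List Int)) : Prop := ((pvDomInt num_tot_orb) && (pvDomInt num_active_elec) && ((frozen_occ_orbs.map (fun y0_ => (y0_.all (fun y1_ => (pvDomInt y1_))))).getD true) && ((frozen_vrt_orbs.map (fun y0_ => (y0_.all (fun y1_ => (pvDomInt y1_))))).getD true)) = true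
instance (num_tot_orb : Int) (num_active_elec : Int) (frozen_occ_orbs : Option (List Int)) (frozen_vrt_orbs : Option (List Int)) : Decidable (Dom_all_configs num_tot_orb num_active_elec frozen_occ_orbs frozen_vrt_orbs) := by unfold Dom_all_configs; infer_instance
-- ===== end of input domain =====

-- B replaces A's prefix recursion by a single Pascal-triangle pass over the active orbitals
-- that maintains, per electron count, the list of masks built so far (objective: alternative).

-- ===== PORT A =====
-- _all_configs: the for-loop is a foldl over range(num_active_elec-1, len(active_orbs));
-- the recursion on the prefix active_orbs[:p] is guarded by a fuel that always suffices
-- (each recursive call strictly shortens the list).  Where Python would raise IndexError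
-- (active_orbs[p] out of range, only reachable for num_active_elec ≤ 0, excluded by Pre_)
-- the pyGet? returns none and the iteration contributes nothing.
-- 2**active_orbs[p] is ported as 2 ^ o.toNat — exact: active orbitals come from range(num_tot_orb), all ≥ 0.
def allConfigsGo : Nat → List Int → Int → Int → List Int
  | 0, _, _, _ => []
  | Nat.succ f, orbs, k, s =>
    (PySem.List.pyRange (k - 1) (orbs.length : Int) 1).foldl
      (fun configs p =>
        match PySem.List.pyGet? orbs p with
        | none => configs
        | some o =>
          let config := s + 2 ^ o.toNat
          if k = 1 then configs ++ [config]
          else configs ++ allConfigsGo f (PySem.List.slice orbs none (some p)) (k - 1) config)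
      []

def all_configs (num_tot_orb : Int) (num_active_elec : Int) (frozen_occ_orbs : Option (List Int)) (frozen_vrt_orbs : Option (List Int)) : List Int :=
  let occ : PySem.Set Int := PySem.Set.ofList (frozen_occ_orbs.getD [])
  let vrt : PySem.Set Int := PySem.Set.ofList (frozen_vrt_orbs.getD [])
  let sa := (PySem.List.pyRange 0 num_tot_orb 1).foldl
    (fun (sa : Int × List Int) p =>
      if PySem.Set.contains occ p then (sa.1 + 2 ^ p.toNat, sa.2)
      else if PySem.Set.contains vrt p then sa
      else (sa.1, sa.2 ++ [p]))
    (0, [])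
  allConfigsGo (sa.2.length + 1) sa.2 num_active_elec sa.1

-- ===== PORT B =====
def all_configs_alt (num_tot_orb : Int) (num_active_elec : Int) (frozen_occ_orbs : Option (List Int)) (frozen_vrt_orbs : Option (List Int)) : List Int :=
  let occ : PySem.Set Int := PySem.Set.ofList (frozen_occ_orbs.getD [])
  let vrt : PySem.Set Int := PySem.Set.ofList (frozen_vrt_orbs.getD [])
  let static_config : Int :=
    (((PySem.List.pyRange 0 num_tot_orb 1).filter (fun p => PySem.Set.contains occ p)).map
      (fun p => (2:Int) ^ p.toNat)).sum
  let active_orbs : List Int :=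
    (PySem.List.pyRange 0 num_tot_orb 1).filter
      (fun p => !PySem.Set.contains occ p && !PySem.Set.contains vrt p)
  if num_active_elec > (active_orbs.length : Int) then []
  else
    let k := num_active_elec.toNat
    let n := active_orbs.length
    let rows := (PySem.List.enumerate active_orbs 0).foldl
      (fun rows io =>
        let w := (2:Int) ^ io.2.toNat
        (List.range (k + 1)).map (fun j =>
          if j + (n - io.1.toNat - 1) < k then []
          else if j = 0 then rows.getD 0 []
          else rows.getD j [] ++ (rows.getD (j - 1) []).map (fun m => m + w)))
      ([static_config] :: List.replicate k [])
    rows.getD k []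

-- ===== PRECONDITION & SPEC =====
-- Pre_ excludes num_active_elec ≤ 0, on which A always raises IndexError.
def Pre_all_configs (num_tot_orb : Int) (num_active_elec : Int) (frozen_occ_orbs : Option (List Int)) (frozen_vrt_orbs : Option (List Int)) : Prop :=
  1 ≤ num_active_elec
instance (num_tot_orb : Int) (num_active_elec : Int) (frozen_occ_orbs : Option (List Int)) (frozen_vrt_orbs : Option (List Int)) : Decidable (Pre_all_configs num_tot_orb num_active_elec frozen_occ_orbs frozen_vrt_orbs) := by unfold Pre_all_configs; infer_instance

def pvWitness_all_configs : Int × Int × Option (List Int) × Option (List Int) := (4, 2, some [0], some [3])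

def Spec_all_configs (num_tot_orb : Int) (num_active_elec : Int) (frozen_occ_orbs : Option (List Int)) (frozen_vrt_orbs : Option (List Int)) (out : List Int) : Prop := out = all_configs_alt num_tot_orb num_active_elec frozen_occ_orbs frozen_vrt_orbs
instance (num_tot_orb : Int) (num_active_elec : Int) (frozen_occ_orbs : Option (List Int)) (frozen_vrt_orbs : Option (List Int)) (out : List Int) : Decidable (Spec_all_configs num_tot_orb num_active_elec frozen_occ_orbs frozen_vrt_orbs out) := by unfold Spec_all_configs; infer_instance

-- ===== CLAIM (what is proved, stated in full; the proofs are below) =====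
def Claim_equal_all_configs : Prop := ∀ (num_tot_orb : Int) (num_active_elec : Int) (frozen_occ_orbs : Option (List Int)) (frozen_vrt_orbs : Option (List Int)), Dom_all_configs num_tot_orb num_active_elec frozen_occ_orbs frozen_vrt_orbs → Pre_all_configs num_tot_orb num_active_elec frozen_occ_orbs frozen_vrt_orbs → Spec_all_configs num_tot_orb num_active_elec frozen_occ_orbs frozen_vrt_orbs (all_configs num_tot_orb num_active_elec frozen_occ_orbs frozen_vrt_orbs)

-- ===== LEMMAS AND PROOFS =====

-- Proof model: the colexicographic combination sums both programs enumerate,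
-- defined by recursion on the reversed orbital list.
def combR : List Int → Nat → List Int
  | _, 0 => [0]
  | [], _ + 1 => []
  | o :: rest, j + 1 => combR rest (j + 1) ++ (combR rest j).map (fun m => m + 2 ^ o.toNat)

def comb (orbs : List Int) (j : Nat) : List Int := combR orbs.reverse j

theorem comb_zero (orbs : List Int) : comb orbs 0 = [0] := by
  unfold comb combR; rfl

theorem comb_snoc (orbs : List Int) (o : Int) (j : Nat) :
    comb (orbs ++ [o]) (j + 1) = comb orbs (j + 1) ++ (comb orbs j).map (fun m => m + 2 ^ o.toNat) := by
  simp [comb, List.reverse_append, combR]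

theorem combR_nil_of_lt : ∀ (l : List Int) (j : Nat), l.length < j → combR l j = [] := by
  intro l
  induction l with
  | nil => intro j hj; match j, hj with | j + 1, _ => rfl
  | cons o rest ih =>
    intro j hj
    match j, hj with
    | j + 1, hj =>
      simp only [combR]
      rw [ih (j + 1) (by simp at hj ⊢; omega), ih j (by simp at hj ⊢; omega)]
      rfl

theorem comb_nil_of_lt : ∀ (orbs : List Int) (j : Nat), orbs.length < j → comb orbs j = [] := by
  intro orbs j hj
  exact combR_nil_of_lt orbs.reverse j (by simpa using hj)

theorem go_fuel : ∀ (f1 f2 : Nat) (orbs : List Int) (k s : Int), 1 ≤ k →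
    orbs.length < f1 → orbs.length < f2 →
    allConfigsGo f1 orbs k s = allConfigsGo f2 orbs k s := by
  intro f1
  induction f1 with
  | zero => intro f2 orbs k s _ h1; omega
  | succ f1 ih =>
    intro f2 orbs k s hk h1 h2
    match f2, h2 with
    | f2 + 1, h2 =>
      simp only [allConfigsGo]
      apply PySem.List.foldl_congr_mem
      intro acc p hp
      rw [PySem.List.mem_pyRange_one] at hp
      have hp0 : 0 ≤ p := by omega
      cases hget : PySem.List.pyGet? orbs p with
      | none => rfl
      | some o =>
        simp only
        by_cases hone : k = 1
        · simp [hone]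
        · simp only [if_neg hone]
          congr 1
          have hlen : (PySem.List.slice orbs none (some p)).length < orbs.length := by
            rw [PySem.List.slice_to orbs hp0, List.length_take]
            have : p.toNat < orbs.length := by omega
            omega
          exact ih f2 _ (k - 1) _ (by omega) (by omega) (by omega)

theorem go_snoc (orbs : List Int) (o : Int) (k s : Int) (hk : 1 ≤ k) :
    allConfigsGo (orbs.length + 2) (orbs ++ [o]) k s
      = allConfigsGo (orbs.length + 1) orbs k s
        ++ (if k = 1 then [s + 2 ^ o.toNat]
            else allConfigsGo (orbs.length + 1) orbs (k - 1) (s + 2 ^ o.toNat)) := by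
  by_cases hbig : (orbs.length : Int) + 1 ≤ k - 1
  · have hk1 : ¬ k = 1 := by
      intro h; rw [h] at hbig; simp at hbig; omega
    have h1 : PySem.List.pyRange (k - 1) (((orbs ++ [o]).length : Nat) : Int) 1 = [] := by
      apply PySem.List.pyRange_one_eq_nil; simp; omega
    have h2 : PySem.List.pyRange (k - 1) ((orbs.length : Nat) : Int) 1 = [] := by
      apply PySem.List.pyRange_one_eq_nil; omega
    have h3 : PySem.List.pyRange (k - 1 - 1) ((orbs.length : Nat) : Int) 1 = [] := by
      apply PySem.List.pyRange_one_eq_nil; omega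
    simp only [allConfigsGo, h1, h2, h3, if_neg hk1, List.foldl_nil, List.nil_append]
  · have hsplit : PySem.List.pyRange (k - 1) (((orbs ++ [o]).length : Nat) : Int) 1
        = PySem.List.pyRange (k - 1) ((orbs.length : Nat) : Int) 1 ++ [(orbs.length : Int)] := by
      rw [show (((orbs ++ [o]).length : Nat) : Int) = (orbs.length : Int) + 1 by simp]
      rw [PySem.List.pyRange_one_append (k - 1) (orbs.length : Int) ((orbs.length : Int) + 1)
        (by omega) (by omega)]
      rw [PySem.List.pyRange_one_singleton]
    have hbase :
        (PySem.List.pyRange (k - 1) ((orbs.length : Nat) : Int) 1).foldl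
          (fun configs p =>
            match PySem.List.pyGet? (orbs ++ [o]) p with
            | none => configs
            | some o' =>
              let config := s + 2 ^ o'.toNat
              if k = 1 then configs ++ [config]
              else configs ++ allConfigsGo (orbs.length + 1) (PySem.List.slice (orbs ++ [o]) none (some p)) (k - 1) config)
          []
        = allConfigsGo (orbs.length + 1) orbs k s := by
      simp only [allConfigsGo]
      apply PySem.List.foldl_congr_mem
      intro acc p hp
      rw [PySem.List.mem_pyRange_one] at hp
      have hp0 : 0 ≤ p := by omega
      have hptn : p.toNat < orbs.length := by omega
      have hget : PySem.List.pyGet? (orbs ++ [o]) p = PySem.List.pyGet? orbs p := by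
        rw [PySem.List.pyGet?_of_nonneg _ hp0, PySem.List.pyGet?_of_nonneg _ hp0,
          List.getElem?_append_left hptn]
      rw [hget]
      cases hg : PySem.List.pyGet? orbs p with
      | none => rfl
      | some o' =>
        simp only
        by_cases hone : k = 1
        · simp [hone]
        · simp only [if_neg hone]
          congr 1
          have hslice : PySem.List.slice (orbs ++ [o]) none (some p) = PySem.List.slice orbs none (some p) := by
            rw [PySem.List.slice_to _ hp0, PySem.List.slice_to _ hp0,
              List.take_append_of_le_length (by omega)]
          rw [hslice]
          have hlen : (PySem.List.slice orbs none (some p)).length < orbs.length := by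
            rw [PySem.List.slice_to orbs hp0, List.length_take]; omega
          exact go_fuel (orbs.length + 1) orbs.length _ (k - 1) _ (by omega) (by omega) (by omega)
    conv_lhs => rw [allConfigsGo]
    rw [hsplit, List.foldl_append, hbase, List.foldl_cons, List.foldl_nil]
    have hgetn : PySem.List.pyGet? (orbs ++ [o]) ((orbs.length : Nat) : Int) = some o :=
      PySem.List.pyGet?_append_length orbs [] o
    rw [hgetn]
    simp only
    by_cases hone : k = 1
    · simp [hone]
    · simp only [if_neg hone]
      congr 1
      have hslice : PySem.List.slice (orbs ++ [o]) none (some ((orbs.length : Nat) : Int)) = orbs := by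
        rw [PySem.List.slice_to _ (by omega)]
        simp
      rw [hslice]

theorem go_eq_comb : ∀ (orbs : List Int) (j : Nat) (s : Int),
    allConfigsGo (orbs.length + 1) orbs ((j : Int) + 1) s
      = (comb orbs (j + 1)).map (fun m => s + m) := by
  intro orbs
  induction orbs using List.reverseRecOn with
  | nil =>
    intro j s
    have h0 : PySem.List.pyRange ((j : Int) + 1 - 1) ((List.length ([] : List Int) : Nat) : Int) 1 = [] := by
      apply PySem.List.pyRange_one_eq_nil; simp
    simp only [allConfigsGo, h0, List.foldl_nil]
    rw [comb_nil_of_lt [] (j + 1) (by simp)]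
    rfl
  | append_singleton orbs o ih =>
    intro j s
    have hlen : (orbs ++ [o]).length + 1 = orbs.length + 2 := by simp
    rw [hlen, go_snoc orbs o ((j : Int) + 1) s (by omega)]
    cases j with
    | zero =>
      rw [if_pos (by norm_num)]
      rw [comb_snoc orbs o 0, comb_zero, ih 0 s]
      simp
    | succ j' =>
      rw [if_neg (by push_cast; omega)]
      have hk1 : ((j' + 1 : Nat) : Int) + 1 - 1 = ((j' : Nat) : Int) + 1 := by push_cast; ring
      rw [hk1, ih j' (s + 2 ^ o.toNat), ih (j' + 1) s, comb_snoc orbs o (j' + 1)]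
      rw [List.map_append, List.map_map]
      congr 1
      apply List.map_congr_left
      intro m _
      simp
      ring

theorem enum_snoc {α : Type} : ∀ (xs : List α) (y : α) (s : Int),
    PySem.List.enumerate (xs ++ [y]) s = PySem.List.enumerate xs s ++ [((s + xs.length : Int), y)] := by
  intro xs
  induction xs with
  | nil => intro y s; simp [PySem.List.enumerate]
  | cons x t ih =>
    intro y s
    simp only [List.cons_append, PySem.List.enumerate, ih, List.length_cons]
    push_cast
    ring_nf

theorem getD_map_range_comb (k : Nat) (g : Nat → List Int) (j : Nat) (hj : j < k + 1) :
    ((List.range (k + 1)).map g).getD j [] = g j := by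
  rw [List.getD_eq_getElem?_getD, List.getElem?_map, List.getElem?_range hj]
  rfl

theorem dp_inv (k n : Nat) (static : Int) (hkn : k ≤ n) : ∀ orbs : List Int, orbs.length ≤ n →
    (PySem.List.enumerate orbs 0).foldl
      (fun rows io =>
        let w := (2:Int) ^ io.2.toNat
        (List.range (k + 1)).map (fun j =>
          if j + (n - io.1.toNat - 1) < k then []
          else if j = 0 then rows.getD 0 []
          else rows.getD j [] ++ (rows.getD (j - 1) []).map (fun m => m + w)))
      ([static] :: List.replicate k [])
    = (List.range (k + 1)).map (fun j =>
        if j + (n - orbs.length) < k then []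
        else (comb orbs j).map (fun m => static + m)) := by
  intro orbs
  induction orbs using List.reverseRecOn with
  | nil =>
    intro _
    simp only [PySem.List.enumerate, List.foldl_nil, List.length_nil, Nat.sub_zero]
    apply List.ext_getElem (by simp)
    intro i hi1 hi2
    have hik : i < k + 1 := by simpa using hi1
    simp only [List.getElem_map, List.getElem_range]
    rw [if_neg (by omega)]
    cases i with
    | zero => simp [comb_zero]
    | succ i =>
      simp only [List.getElem_cons_succ]
      rw [comb_nil_of_lt [] (i + 1) (by simp)]
      simp [List.getElem_replicate]
  | append_singleton orbs o ih =>
    intro hlen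
    have hm : orbs.length + 1 ≤ n := by simpa using hlen
    rw [enum_snoc orbs o 0, List.foldl_append, ih (by omega), List.foldl_cons, List.foldl_nil]
    simp only [zero_add, Int.toNat_natCast]
    apply List.map_congr_left
    intro j hj
    have hjk : j < k + 1 := by simpa using hj
    have hcond : (n - orbs.length - 1 = n - (orbs ++ [o]).length) := by simp; omega
    rw [hcond]
    by_cases hcl : j + (n - (orbs ++ [o]).length) < k
    · rw [if_pos hcl, if_pos hcl]
    · rw [if_neg hcl, if_neg hcl]
      have hlive : j + (n - (orbs ++ [o]).length) ≥ k := by omega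
      have hlo : (orbs ++ [o]).length = orbs.length + 1 := by simp
      cases j with
      | zero =>
        rw [if_pos rfl]
        rw [getD_map_range_comb k _ 0 (by omega)]
        rw [if_neg (by rw [hlo] at hlive; omega)]
        rw [comb_zero, comb_zero]
      | succ i =>
        rw [if_neg (by omega), Nat.add_sub_cancel]
        rw [getD_map_range_comb k _ (i + 1) hjk, getD_map_range_comb k _ i (by omega)]
        rw [if_neg (by rw [hlo] at hlive; omega),
          if_neg (by rw [hlo] at hlive; omega)]
        rw [comb_snoc orbs o i, List.map_append, List.map_map, List.map_map]
        congr 1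
        apply List.map_congr_left
        intro m _
        simp
        ring

theorem build_fold (po pv : Int → Bool) : ∀ (l : List Int) (s0 : Int) (a0 : List Int),
    l.foldl
      (fun (sa : Int × List Int) p =>
        if po p then (sa.1 + 2 ^ p.toNat, sa.2)
        else if pv p then sa
        else (sa.1, sa.2 ++ [p]))
      (s0, a0)
    = (s0 + ((l.filter (fun p => po p)).map (fun p => (2:Int) ^ p.toNat)).sum,
       a0 ++ l.filter (fun p => !po p && !pv p)) := by
  intro l
  induction l with
  | nil => intro s0 a0; simp
  | cons p rest ih =>
    intro s0 a0
    by_cases hpo : po p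
    · simp [hpo, ih, add_assoc]
    · by_cases hpv : pv p
      · simp [hpo, hpv, ih]
      · simp [hpo, hpv, ih]

-- ===== VERDICT (by name: the statement is the Claim_ definition above) =====
theorem all_configs_spec : Claim_equal_all_configs := by
  intro nto k fo fv hDom hPre
  unfold Pre_all_configs at hPre
  unfold Spec_all_configs all_configs all_configs_alt
  dsimp only
  rw [build_fold _ _ (PySem.List.pyRange 0 nto 1) 0 []]
  dsimp only
  rw [List.nil_append]
  obtain ⟨j, hj⟩ : ∃ j : Nat, k = (j : Int) + 1 := ⟨(k - 1).toNat, by omega⟩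
  set active := (PySem.List.pyRange 0 nto 1).filter
    (fun p => !PySem.Set.contains (PySem.Set.ofList (fo.getD [])) p &&
              !PySem.Set.contains (PySem.Set.ofList (fv.getD [])) p) with hactive
  set static := (((PySem.List.pyRange 0 nto 1).filter
      (fun p => PySem.Set.contains (PySem.Set.ofList (fo.getD [])) p)).map
      (fun p => (2:Int) ^ p.toNat)).sum with hstatic
  by_cases hgt : (active.length : Int) < k
  · rw [if_pos hgt]
    have h0 : PySem.List.pyRange (k - 1) ((active.length : Nat) : Int) 1 = [] := by
      apply PySem.List.pyRange_one_eq_nil; omega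
    simp only [allConfigsGo, h0, List.foldl_nil]
  · rw [if_neg hgt]
    have hkn : k.toNat ≤ active.length := by omega
    rw [dp_inv k.toNat active.length static hkn active (le_refl _)]
    rw [getD_map_range_comb k.toNat _ k.toNat (by omega)]
    rw [if_neg (by omega)]
    rw [hj, zero_add, go_eq_comb active j static,
      show (((j : Int) + 1)).toNat = j + 1 by omega]
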